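-- pv_equiv track=rewrite | github.com/yksanjo/pr-summarizer | summarize_pr.py | suggest_reviewers
-- ===== SOURCE A (Python) =====
-- from typing import Dict, List, Optional, Tuple
--
-- def suggest_reviewers(files: List[Dict], repo_name: str, github_token: str) -> List[str]:
--     """Suggest reviewers based on file ownership (CODEOWNERS or git blame)."""
--     # This is a simplified version - in production, you'd check CODEOWNERS file
--     # or use git blame to find frequent contributors
--
--     # Group files by directory
--     directories = {}
--     for file in files:
--         dir_path = "/".join(file["filename"].split("/")[:-1])
--         if dir_path:
--             directories[dir_path] = directories.get(dir_path, 0) + 1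
--
--     # Simple heuristic: suggest based on file paths
--     suggestions = []
--
--     # Check for common patterns
--     if any("auth" in f["filename"].lower() or "security" in f["filename"].lower() for f in files):
--         suggestions.append("security-team")
--
--     if any("test" in f["filename"].lower() for f in files):
--         suggestions.append("qa-team")
--
--     if any("frontend" in f["filename"].lower() or "ui" in f["filename"].lower() for f in files):
--         suggestions.append("frontend-team")
--
--     if any("backend" in f["filename"].lower() or "api" in f["filename"].lower() for f in files):
--         suggestions.append("backend-team")
--
--     return suggestions[:3]  # Limit to 3 suggestions
-- ===== SOURCE B (Python) =====
-- def suggest_reviewers(files, repo_name, github_token):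
--     """Suggest reviewers based on file path keywords (single pass)."""
--     security = qa = frontend = backend = False
--     for f in files:
--         name = f["filename"].lower()
--         security = security or "auth" in name or "security" in name
--         qa = qa or "test" in name
--         frontend = frontend or "frontend" in name or "ui" in name
--         backend = backend or "backend" in name or "api" in name
--     suggestions = []
--     if security:
--         suggestions.append("security-team")
--     if qa:
--         suggestions.append("qa-team")
--     if frontend:
--         suggestions.append("frontend-team")
--     if backend:
--         suggestions.append("backend-team")
--     return suggestions[:3]
-- ===== Notes on version B (the rewrite author's own statement) =====
-- stated objective: simpler
-- what changed: Drops the dead directories-counting dict and replaces four separate any() scans of the file list with one pass that lowercases each filename once and accumulates four boolean flags, then emits the team list from the flags.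
import Mathlib
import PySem

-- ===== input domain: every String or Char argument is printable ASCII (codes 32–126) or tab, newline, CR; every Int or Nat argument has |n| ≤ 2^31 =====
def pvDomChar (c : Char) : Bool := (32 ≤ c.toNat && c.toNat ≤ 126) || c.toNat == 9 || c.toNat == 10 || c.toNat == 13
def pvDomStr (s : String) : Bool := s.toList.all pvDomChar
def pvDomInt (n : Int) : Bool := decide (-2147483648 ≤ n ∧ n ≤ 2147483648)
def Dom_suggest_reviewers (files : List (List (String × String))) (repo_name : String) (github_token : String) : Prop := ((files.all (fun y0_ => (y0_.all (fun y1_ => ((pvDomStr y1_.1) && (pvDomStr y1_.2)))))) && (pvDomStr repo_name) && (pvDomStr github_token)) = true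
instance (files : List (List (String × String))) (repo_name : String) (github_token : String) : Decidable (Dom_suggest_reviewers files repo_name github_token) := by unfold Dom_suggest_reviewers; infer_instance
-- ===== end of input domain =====

-- ===== PORT A =====
-- B is one pass with four boolean flags instead of a dead directories dict plus four any() scans; return value equivalence (no mutation in either).
-- file["filename"] is ported as Dict.getD _ "filename" ""; inside Pre_ (key present) this is exactly Python's lookup.
def suggest_reviewers (files : List (List (String × String))) (repo_name : String) (github_token : String) : List String :=
  -- directories dict (computed and never used, as in A)
  let _directories : PySem.Dict String Int := files.foldl (fun d file =>
    -- "/".join(name.split("/")[:-1]); split? with sep "/" ≠ "" is always some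
    let dir_path := PySem.Str.join "/" (PySem.List.slice ((PySem.Str.split? ((PySem.Dict.mk file).getD "filename" "") "/").getD []) none (some (-1)))
    if dir_path ≠ "" then d.insert dir_path (d.getD dir_path 0 + 1) else d) PySem.Dict.empty
  let suggestions : List String := []
  let suggestions := if files.any (fun f => PySem.Str.isIn "auth" (PySem.Str.lower ((PySem.Dict.mk f).getD "filename" "")) || PySem.Str.isIn "security" (PySem.Str.lower ((PySem.Dict.mk f).getD "filename" ""))) then suggestions ++ ["security-team"] else suggestions
  let suggestions := if files.any (fun f => PySem.Str.isIn "test" (PySem.Str.lower ((PySem.Dict.mk f).getD "filename" ""))) then suggestions ++ ["qa-team"] else suggestions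
  let suggestions := if files.any (fun f => PySem.Str.isIn "frontend" (PySem.Str.lower ((PySem.Dict.mk f).getD "filename" "")) || PySem.Str.isIn "ui" (PySem.Str.lower ((PySem.Dict.mk f).getD "filename" ""))) then suggestions ++ ["frontend-team"] else suggestions
  let suggestions := if files.any (fun f => PySem.Str.isIn "backend" (PySem.Str.lower ((PySem.Dict.mk f).getD "filename" "")) || PySem.Str.isIn "api" (PySem.Str.lower ((PySem.Dict.mk f).getD "filename" ""))) then suggestions ++ ["backend-team"] else suggestions
  PySem.List.slice suggestions none (some 3)

-- ===== PORT B =====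
def suggest_reviewers_alt (files : List (List (String × String))) (repo_name : String) (github_token : String) : List String :=
  let flags : Bool × Bool × Bool × Bool := files.foldl (fun st f =>
    let name := PySem.Str.lower ((PySem.Dict.mk f).getD "filename" "")
    (st.1 || (PySem.Str.isIn "auth" name || PySem.Str.isIn "security" name),
     st.2.1 || PySem.Str.isIn "test" name,
     st.2.2.1 || (PySem.Str.isIn "frontend" name || PySem.Str.isIn "ui" name),
     st.2.2.2 || (PySem.Str.isIn "backend" name || PySem.Str.isIn "api" name)))
    (false, false, false, false)
  let suggestions : List String := []
  let suggestions := if flags.1 then suggestions ++ ["security-team"] else suggestions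
  let suggestions := if flags.2.1 then suggestions ++ ["qa-team"] else suggestions
  let suggestions := if flags.2.2.1 then suggestions ++ ["frontend-team"] else suggestions
  let suggestions := if flags.2.2.2 then suggestions ++ ["backend-team"] else suggestions
  PySem.List.slice suggestions none (some 3)

-- ===== PRECONDITION & SPEC =====
-- Pre_ excludes files lacking a "filename" key, on which Python A raises KeyError.
def Pre_suggest_reviewers (files : List (List (String × String))) (repo_name : String) (github_token : String) : Prop :=
  files.all (fun f => (PySem.Dict.mk f).contains "filename") = true
instance (files : List (List (String × String))) (repo_name : String) (github_token : String) : Decidable (Pre_suggest_reviewers files repo_name github_token) := by unfold Pre_suggest_reviewers; infer_instance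
def pvWitness_suggest_reviewers : (List (List (String × String))) × String × String := ([[("filename", "src/auth/login.py")]], "repo", "tok")

def Spec_suggest_reviewers (files : List (List (String × String))) (repo_name : String) (github_token : String) (out : List String) : Prop := out = suggest_reviewers_alt files repo_name github_token
instance (files : List (List (String × String))) (repo_name : String) (github_token : String) (out : List String) : Decidable (Spec_suggest_reviewers files repo_name github_token out) := by unfold Spec_suggest_reviewers; infer_instance

-- ===== CLAIM (what is proved, stated in full; the proofs are below) =====
def Claim_equal_suggest_reviewers : Prop := ∀ (files : List (List (String × String))) (repo_name : String) (github_token : String), Dom_suggest_reviewers files repo_name github_token → Pre_suggest_reviewers files repo_name github_token → Spec_suggest_reviewers files repo_name github_token (suggest_reviewers files repo_name github_token)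

-- ===== LEMMAS AND PROOFS =====
theorem foldl_four_flags {α : Type} (l : List α) (p1 p2 p3 p4 : α → Bool) (b : Bool × Bool × Bool × Bool) :
    l.foldl (fun st f => (st.1 || p1 f, st.2.1 || p2 f, st.2.2.1 || p3 f, st.2.2.2 || p4 f)) b
      = (b.1 || l.any p1, b.2.1 || l.any p2, b.2.2.1 || l.any p3, b.2.2.2 || l.any p4) := by
  induction l generalizing b with
  | nil => simp
  | cons x xs ih => simp [List.foldl_cons, ih, Bool.or_assoc]

-- ===== VERDICT (by name: the statement is the Claim_ definition above) =====
theorem suggest_reviewers_spec : Claim_equal_suggest_reviewers := by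
  intro files repo_name github_token _ _
  unfold Spec_suggest_reviewers suggest_reviewers suggest_reviewers_alt
  rw [foldl_four_flags]
  simp
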